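-- pv_equiv track=rewrite | github.com/PinedaMikeB/marga-app | tools/sync-final-marga-users.py | map_position_to_role
-- ===== SOURCE A (Python) =====
-- def map_position_to_role(position: str) -> str:
--     p = (position or "").strip().lower()
--     if not p:
--         return "viewer"
--     if "admin" in p:
--         return "admin"
--     if "collect" in p:
--         return "collection"
--     if any(token in p for token in ("billing", "cashier", "account", "finance", "purchasing")):
--         return "billing"
--     if "messenger" in p or "driver" in p:
--         return "messenger"
--     if any(token in p for token in ("tech", "maintenance", "refiller")):
--         return "technician"
--     if any(token in p for token in ("service", "csr", "sales")):
--         return "service"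
--     if "hr" in p:
--         return "hr"
--     return "viewer"
-- ===== SOURCE B (Python) =====
-- ROLES = ("admin", "collection", "billing", "messenger", "technician", "service", "hr")
--
-- TOKEN_PRIORITY = {
--     "admin": 0, "collect": 1,
--     "billing": 2, "cashier": 2, "account": 2, "finance": 2, "purchasing": 2,
--     "messenger": 3, "driver": 3,
--     "tech": 4, "maintenance": 4, "refiller": 4,
--     "service": 5, "csr": 5, "sales": 5,
--     "hr": 6,
-- }
--
--
-- def map_position_to_role(position: str) -> str:
--     # Single left-to-right scan over the text: at each character position see
--     # which keywords START there and keep the best (lowest) priority seen.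
--     p = (position or "").strip().lower()
--     best = len(ROLES)
--     for i in range(len(p)):
--         for token, pri in TOKEN_PRIORITY.items():
--             if pri < best and p.startswith(token, i):
--                 best = pri
--     return ROLES[best] if best < len(ROLES) else "viewer"
-- ===== Notes on version B (the rewrite author's own statement) =====
-- stated objective: alternative
-- what changed: Instead of testing each keyword for substring containment in branch order, B makes a single left-to-right scan over the string, checking at every character position which keywords start there and keeping the minimum-priority match; the role is read off a priority-indexed table at the end.
import Mathlib
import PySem

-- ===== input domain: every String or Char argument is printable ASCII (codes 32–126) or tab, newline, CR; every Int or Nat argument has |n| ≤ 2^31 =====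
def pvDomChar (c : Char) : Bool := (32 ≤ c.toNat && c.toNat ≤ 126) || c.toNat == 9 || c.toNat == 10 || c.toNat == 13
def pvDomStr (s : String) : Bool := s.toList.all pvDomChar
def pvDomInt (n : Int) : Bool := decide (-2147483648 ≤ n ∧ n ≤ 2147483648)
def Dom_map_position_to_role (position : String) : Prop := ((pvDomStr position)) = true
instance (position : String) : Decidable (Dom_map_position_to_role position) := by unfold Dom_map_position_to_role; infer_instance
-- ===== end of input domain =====

-- B replaces A's ordered substring-containment cascade by a single left-to-right scan over the
-- string that records, at each character position, the minimum priority of any keyword starting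
-- there, and reads the role off a priority-indexed table (alternative algorithm, same cost).

-- ===== PORT A =====
def map_position_to_role (position : String) : String :=
  let p := PySem.Str.lower (PySem.Str.strip position)
  if p = "" then "viewer"
  else if PySem.Str.isIn "admin" p then "admin"
  else if PySem.Str.isIn "collect" p then "collection"
  else if ["billing", "cashier", "account", "finance", "purchasing"].any (fun token => PySem.Str.isIn token p) then "billing"
  else if PySem.Str.isIn "messenger" p || PySem.Str.isIn "driver" p then "messenger"
  else if ["tech", "maintenance", "refiller"].any (fun token => PySem.Str.isIn token p) then "technician"
  else if ["service", "csr", "sales"].any (fun token => PySem.Str.isIn token p) then "service"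
  else if PySem.Str.isIn "hr" p then "hr"
  else "viewer"

-- ===== PORT B =====
def pvRoles : List String :=
  ["admin", "collection", "billing", "messenger", "technician", "service", "hr"]

-- dict TOKEN_PRIORITY as an association list in insertion order (tokens stored as List Char)
def pvTokenPriority : List (List Char × Nat) :=
  [ ("admin".toList, 0), ("collect".toList, 1)
  , ("billing".toList, 2), ("cashier".toList, 2), ("account".toList, 2), ("finance".toList, 2), ("purchasing".toList, 2)
  , ("messenger".toList, 3), ("driver".toList, 3)
  , ("tech".toList, 4), ("maintenance".toList, 4), ("refiller".toList, 4)
  , ("service".toList, 5), ("csr".toList, 5), ("sales".toList, 5)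
  , ("hr".toList, 6) ]

-- p.startswith(token, i) is ported as PySem.Chars.startswith on the suffix p[i:], which is exact
-- for 0 ≤ i (Python's two-argument startswith compares the prefix of p[i:]).
def map_position_to_role_alt (position : String) : String :=
  let cs := (PySem.Str.lower (PySem.Str.strip position)).toList
  let best := (List.range cs.length).foldl
    (fun best i => pvTokenPriority.foldl
      (fun b t => if t.2 < b && PySem.Chars.startswith (cs.drop i) t.1 then t.2 else b) best)
    7
  if best < 7 then pvRoles.getD best "viewer" else "viewer"

-- ===== PRECONDITION & SPEC =====
def Spec_map_position_to_role (position : String) (out : String) : Prop := out = map_position_to_role_alt position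
instance (position : String) (out : String) : Decidable (Spec_map_position_to_role position out) := by unfold Spec_map_position_to_role; infer_instance

-- ===== CLAIM (what is proved, stated in full; the proofs are below) =====
def Claim_equal_map_position_to_role : Prop := ∀ (position : String), Dom_map_position_to_role position → Spec_map_position_to_role position (map_position_to_role position)

-- ===== LEMMAS AND PROOFS =====

-- the multiset of priorities of all (position, token) matches found by B's scan
def pvMatches (cs : List Char) : List Nat :=
  (List.range cs.length).flatMap
    (fun i => (pvTokenPriority.filter (fun t => PySem.Chars.startswith (cs.drop i) t.1)).map (·.2))

theorem pv_foldl_if_min (ts : List (List Char × Nat)) (P : List Char × Nat → Bool) (b : Nat) :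
    ts.foldl (fun b t => if t.2 < b && P t then t.2 else b) b
      = ((ts.filter P).map (·.2)).foldl min b := by
  induction ts generalizing b with
  | nil => rfl
  | cons t ts ih =>
      rw [List.foldl_cons, List.filter_cons]
      cases hP : P t with
      | false =>
          rw [if_neg (by simp)]
          simp only [Bool.false_eq_true, if_false]
          exact ih b
      | true =>
          rw [if_pos rfl]
          simp only [Bool.and_true, decide_eq_true_eq, List.map_cons, List.foldl_cons]
          rw [ih]
          congr 1
          split <;> omega

theorem pv_foldl_flat (is : List Nat) (f : Nat → List Nat) (b : Nat) :
    is.foldl (fun b i => (f i).foldl min b) b = (is.flatMap f).foldl min b := by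
  induction is generalizing b with
  | nil => rfl
  | cons i is ih => simp [List.flatMap_cons, List.foldl_append, ih]

theorem pv_best_eq (cs : List Char) :
    (List.range cs.length).foldl
      (fun best i => pvTokenPriority.foldl
        (fun b t => if t.2 < b && PySem.Chars.startswith (cs.drop i) t.1 then t.2 else b) best)
      7 = (pvMatches cs).foldl min 7 := by
  simp only [pv_foldl_if_min, pv_foldl_flat, pvMatches]

theorem pv_exists_drop_lt (tok cs : List Char) (h : tok ≠ []) :
    (∃ i, i < cs.length ∧ tok <+: cs.drop i) ↔ PySem.Chars.isIn tok cs = true := by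
  constructor
  · rintro ⟨i, _, hpre⟩
    exact (PySem.Chars.exists_prefix_drop_iff_isIn tok cs).1 ⟨i, hpre⟩
  · intro hin
    obtain ⟨j, hpre⟩ := (PySem.Chars.exists_prefix_drop_iff_isIn tok cs).2 hin
    by_cases hj : j < cs.length
    · exact ⟨j, hj, hpre⟩
    · exfalso
      have : cs.drop j = [] := List.drop_eq_nil_of_le (by omega)
      rw [this] at hpre
      exact h (List.prefix_nil.mp hpre)

theorem pv_mem_matches (k : Nat) (cs : List Char) :
    k ∈ pvMatches cs ↔ ∃ t ∈ pvTokenPriority, t.2 = k ∧ PySem.Chars.isIn t.1 cs = true := by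
  have hne : ∀ t ∈ pvTokenPriority, t.1 ≠ [] := by decide
  simp only [pvMatches, List.mem_flatMap, List.mem_map, List.mem_filter, List.mem_range]
  constructor
  · rintro ⟨i, hi, t, ⟨ht, hsw⟩, hk⟩
    exact ⟨t, ht, hk,
      (pv_exists_drop_lt t.1 cs (hne t ht)).1 ⟨i, hi, (PySem.Chars.startswith_iff _ _).1 hsw⟩⟩
  · rintro ⟨t, ht, hk, hin⟩
    obtain ⟨i, hi, hpre⟩ := (pv_exists_drop_lt t.1 cs (hne t ht)).2 hin
    exact ⟨i, hi, t, ⟨ht, (PySem.Chars.startswith_iff _ _).2 hpre⟩, hk⟩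

theorem pv_mem0 (cs : List Char) : 0 ∈ pvMatches cs ↔ PySem.Chars.isIn ['a', 'd', 'm', 'i', 'n'] cs = true := by
  rw [pv_mem_matches]; simp [pvTokenPriority]
theorem pv_mem1 (cs : List Char) : 1 ∈ pvMatches cs ↔ PySem.Chars.isIn ['c', 'o', 'l', 'l', 'e', 'c', 't'] cs = true := by
  rw [pv_mem_matches]; simp [pvTokenPriority]
theorem pv_mem2 (cs : List Char) : 2 ∈ pvMatches cs ↔
    (PySem.Chars.isIn ['b', 'i', 'l', 'l', 'i', 'n', 'g'] cs = true ∨ PySem.Chars.isIn ['c', 'a', 's', 'h', 'i', 'e', 'r'] cs = true ∨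
     PySem.Chars.isIn ['a', 'c', 'c', 'o', 'u', 'n', 't'] cs = true ∨ PySem.Chars.isIn ['f', 'i', 'n', 'a', 'n', 'c', 'e'] cs = true ∨
     PySem.Chars.isIn ['p', 'u', 'r', 'c', 'h', 'a', 's', 'i', 'n', 'g'] cs = true) := by
  rw [pv_mem_matches]; simp [pvTokenPriority]
theorem pv_mem3 (cs : List Char) : 3 ∈ pvMatches cs ↔
    (PySem.Chars.isIn ['m', 'e', 's', 's', 'e', 'n', 'g', 'e', 'r'] cs = true ∨ PySem.Chars.isIn ['d', 'r', 'i', 'v', 'e', 'r'] cs = true) := by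
  rw [pv_mem_matches]; simp [pvTokenPriority]
theorem pv_mem4 (cs : List Char) : 4 ∈ pvMatches cs ↔
    (PySem.Chars.isIn ['t', 'e', 'c', 'h'] cs = true ∨ PySem.Chars.isIn ['m', 'a', 'i', 'n', 't', 'e', 'n', 'a', 'n', 'c', 'e'] cs = true ∨
     PySem.Chars.isIn ['r', 'e', 'f', 'i', 'l', 'l', 'e', 'r'] cs = true) := by
  rw [pv_mem_matches]; simp [pvTokenPriority]
theorem pv_mem5 (cs : List Char) : 5 ∈ pvMatches cs ↔
    (PySem.Chars.isIn ['s', 'e', 'r', 'v', 'i', 'c', 'e'] cs = true ∨ PySem.Chars.isIn ['c', 's', 'r'] cs = true ∨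
     PySem.Chars.isIn ['s', 'a', 'l', 'e', 's'] cs = true) := by
  rw [pv_mem_matches]; simp [pvTokenPriority]
theorem pv_mem6 (cs : List Char) : 6 ∈ pvMatches cs ↔ PySem.Chars.isIn ['h', 'r'] cs = true := by
  rw [pv_mem_matches]; simp [pvTokenPriority]

-- main equality, stated on the shared lowered/stripped character list
theorem pv_key (cs : List Char) :
    (if cs = [] then "viewer"
     else if PySem.Chars.isIn ['a', 'd', 'm', 'i', 'n'] cs then "admin"
     else if PySem.Chars.isIn ['c', 'o', 'l', 'l', 'e', 'c', 't'] cs then "collection"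
     else if PySem.Chars.isIn ['b', 'i', 'l', 'l', 'i', 'n', 'g'] cs || (PySem.Chars.isIn ['c', 'a', 's', 'h', 'i', 'e', 'r'] cs ||
             (PySem.Chars.isIn ['a', 'c', 'c', 'o', 'u', 'n', 't'] cs || (PySem.Chars.isIn ['f', 'i', 'n', 'a', 'n', 'c', 'e'] cs ||
             PySem.Chars.isIn ['p', 'u', 'r', 'c', 'h', 'a', 's', 'i', 'n', 'g'] cs))) then "billing"
     else if PySem.Chars.isIn ['m', 'e', 's', 's', 'e', 'n', 'g', 'e', 'r'] cs || PySem.Chars.isIn ['d', 'r', 'i', 'v', 'e', 'r'] cs then "messenger"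
     else if PySem.Chars.isIn ['t', 'e', 'c', 'h'] cs || (PySem.Chars.isIn ['m', 'a', 'i', 'n', 't', 'e', 'n', 'a', 'n', 'c', 'e'] cs ||
             PySem.Chars.isIn ['r', 'e', 'f', 'i', 'l', 'l', 'e', 'r'] cs) then "technician"
     else if PySem.Chars.isIn ['s', 'e', 'r', 'v', 'i', 'c', 'e'] cs || (PySem.Chars.isIn ['c', 's', 'r'] cs ||
             PySem.Chars.isIn ['s', 'a', 'l', 'e', 's'] cs) then "service"
     else if PySem.Chars.isIn ['h', 'r'] cs then "hr"
     else "viewer")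
    = (if (pvMatches cs).foldl min 7 < 7 then pvRoles.getD ((pvMatches cs).foldl min 7) "viewer" else "viewer") := by
  by_cases hnil : cs = []
  · subst hnil; rfl
  · have hle : ∀ x ∈ pvMatches cs, (pvMatches cs).foldl min 7 ≤ x :=
      (PySem.List.foldl_min_le (pvMatches cs) 7).2
    have hle7 : (pvMatches cs).foldl min 7 ≤ 7 := (PySem.List.foldl_min_le (pvMatches cs) 7).1
    have hmem : (pvMatches cs).foldl min 7 = 7 ∨ (pvMatches cs).foldl min 7 ∈ pvMatches cs :=
      PySem.List.foldl_min_mem (pvMatches cs) 7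
    set m := (pvMatches cs).foldl min 7 with hm
    clear hm
    clear_value m
    rw [if_neg hnil]
    by_cases h0 : PySem.Chars.isIn ['a', 'd', 'm', 'i', 'n'] cs = true
    · have h : m = 0 := Nat.le_zero.mp (hle 0 ((pv_mem0 cs).2 h0))
      subst h
      simp_all [pvRoles]
    · simp only [Bool.not_eq_true] at h0
      by_cases h1 : PySem.Chars.isIn ['c', 'o', 'l', 'l', 'e', 'c', 't'] cs = true
      · have hlt : m ≤ 1 := hle 1 ((pv_mem1 cs).2 h1)
        have h : m = 1 := by
          rcases hmem with h7 | hm'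
          · omega
          · interval_cases m
            · simp [(pv_mem0 cs).1 hm'] at h0
            · rfl
        subst h
        simp_all [pvRoles]
      · simp only [Bool.not_eq_true] at h1
        by_cases h2 : PySem.Chars.isIn ['b', 'i', 'l', 'l', 'i', 'n', 'g'] cs = true ∨ PySem.Chars.isIn ['c', 'a', 's', 'h', 'i', 'e', 'r'] cs = true ∨
            PySem.Chars.isIn ['a', 'c', 'c', 'o', 'u', 'n', 't'] cs = true ∨ PySem.Chars.isIn ['f', 'i', 'n', 'a', 'n', 'c', 'e'] cs = true ∨
            PySem.Chars.isIn ['p', 'u', 'r', 'c', 'h', 'a', 's', 'i', 'n', 'g'] cs = true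
        · have hlt : m ≤ 2 := hle 2 ((pv_mem2 cs).2 h2)
          have h : m = 2 := by
            rcases hmem with h7 | hm'
            · omega
            · interval_cases m
              · simp [(pv_mem0 cs).1 hm'] at h0
              · simp [(pv_mem1 cs).1 hm'] at h1
              · rfl
          subst h
          rcases h2 with h2' | h2' | h2' | h2' | h2' <;> simp_all [pvRoles]
        · push Not at h2
          obtain ⟨h2a, h2b, h2c, h2d, h2e⟩ := h2
          simp only [Bool.not_eq_true] at h2a h2b h2c h2d h2e
          by_cases h3 : PySem.Chars.isIn ['m', 'e', 's', 's', 'e', 'n', 'g', 'e', 'r'] cs = true ∨ PySem.Chars.isIn ['d', 'r', 'i', 'v', 'e', 'r'] cs = true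
          · have hlt : m ≤ 3 := hle 3 ((pv_mem3 cs).2 h3)
            have h : m = 3 := by
              rcases hmem with h7 | hm'
              · omega
              · interval_cases m
                · simp [(pv_mem0 cs).1 hm'] at h0
                · simp [(pv_mem1 cs).1 hm'] at h1
                · rcases (pv_mem2 cs).1 hm' with h' | h' | h' | h' | h' <;> simp_all
                · rfl
            subst h
            rcases h3 with h3' | h3' <;> simp_all [pvRoles]
          · push Not at h3
            obtain ⟨h3a, h3b⟩ := h3
            simp only [Bool.not_eq_true] at h3a h3b
            by_cases h4 : PySem.Chars.isIn ['t', 'e', 'c', 'h'] cs = true ∨ PySem.Chars.isIn ['m', 'a', 'i', 'n', 't', 'e', 'n', 'a', 'n', 'c', 'e'] cs = true ∨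
                PySem.Chars.isIn ['r', 'e', 'f', 'i', 'l', 'l', 'e', 'r'] cs = true
            · have hlt : m ≤ 4 := hle 4 ((pv_mem4 cs).2 h4)
              have h : m = 4 := by
                rcases hmem with h7 | hm'
                · omega
                · interval_cases m
                  · simp [(pv_mem0 cs).1 hm'] at h0
                  · simp [(pv_mem1 cs).1 hm'] at h1
                  · rcases (pv_mem2 cs).1 hm' with h' | h' | h' | h' | h' <;> simp_all
                  · rcases (pv_mem3 cs).1 hm' with h' | h' <;> simp_all
                  · rfl
              subst h
              rcases h4 with h4' | h4' | h4' <;> simp_all [pvRoles]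
            · push Not at h4
              obtain ⟨h4a, h4b, h4c⟩ := h4
              simp only [Bool.not_eq_true] at h4a h4b h4c
              by_cases h5 : PySem.Chars.isIn ['s', 'e', 'r', 'v', 'i', 'c', 'e'] cs = true ∨ PySem.Chars.isIn ['c', 's', 'r'] cs = true ∨
                  PySem.Chars.isIn ['s', 'a', 'l', 'e', 's'] cs = true
              · have hlt : m ≤ 5 := hle 5 ((pv_mem5 cs).2 h5)
                have h : m = 5 := by
                  rcases hmem with h7 | hm'
                  · omega
                  · interval_cases m
                    · simp [(pv_mem0 cs).1 hm'] at h0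
                    · simp [(pv_mem1 cs).1 hm'] at h1
                    · rcases (pv_mem2 cs).1 hm' with h' | h' | h' | h' | h' <;> simp_all
                    · rcases (pv_mem3 cs).1 hm' with h' | h' <;> simp_all
                    · rcases (pv_mem4 cs).1 hm' with h' | h' | h' <;> simp_all
                    · rfl
                subst h
                rcases h5 with h5' | h5' | h5' <;> simp_all [pvRoles]
              · push Not at h5
                obtain ⟨h5a, h5b, h5c⟩ := h5
                simp only [Bool.not_eq_true] at h5a h5b h5c
                by_cases h6 : PySem.Chars.isIn ['h', 'r'] cs = true
                · have hlt : m ≤ 6 := hle 6 ((pv_mem6 cs).2 h6)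
                  have h : m = 6 := by
                    rcases hmem with h7 | hm'
                    · omega
                    · interval_cases m
                      · simp [(pv_mem0 cs).1 hm'] at h0
                      · simp [(pv_mem1 cs).1 hm'] at h1
                      · rcases (pv_mem2 cs).1 hm' with h' | h' | h' | h' | h' <;> simp_all
                      · rcases (pv_mem3 cs).1 hm' with h' | h' <;> simp_all
                      · rcases (pv_mem4 cs).1 hm' with h' | h' | h' <;> simp_all
                      · rcases (pv_mem5 cs).1 hm' with h' | h' | h' <;> simp_all
                      · rfl
                  subst h
                  simp_all [pvRoles]
                · simp only [Bool.not_eq_true] at h6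
                  have h : m = 7 := by
                    rcases hmem with h7 | hm'
                    · exact h7
                    · interval_cases m
                      · simp [(pv_mem0 cs).1 hm'] at h0
                      · simp [(pv_mem1 cs).1 hm'] at h1
                      · rcases (pv_mem2 cs).1 hm' with h' | h' | h' | h' | h' <;> simp_all
                      · rcases (pv_mem3 cs).1 hm' with h' | h' <;> simp_all
                      · rcases (pv_mem4 cs).1 hm' with h' | h' | h' <;> simp_all
                      · rcases (pv_mem5 cs).1 hm' with h' | h' | h' <;> simp_all
                      · simp [(pv_mem6 cs).1 hm'] at h6
                      · rfl
                  subst h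
                  simp_all

-- ===== VERDICT (by name: the statement is the Claim_ definition above) =====
theorem map_position_to_role_spec : Claim_equal_map_position_to_role := by
  intro position _
  show map_position_to_role position = map_position_to_role_alt position
  simp only [map_position_to_role, map_position_to_role_alt]
  rw [pv_best_eq]
  have hkey := pv_key (PySem.Str.lower (PySem.Str.strip position)).toList
  simp only [PySem.Str.isIn_eq, List.any_cons, List.any_nil, Bool.or_false,
    ← String.toList_eq_nil_iff]
  exact hkey
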